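-- pv_equiv track=rewrite | github.com/PPZeen/Comprog_graders | P2_03_Func2_Potpourri.py | is_heterogram
-- ===== SOURCE A (Python) =====
-- def is_heterogram(s):
--     k = s.lower()
--     char='abcdefghijklmnopqrstuvwxyz'
--     p={}
--     for e in char: p[e]=0
--     for e in k:
--         if e in p: p[e]+=1
--     for e in p:
--         if p[e]>1: return False
--     return True
-- ===== SOURCE B (Python) =====
-- ALPHABET = set('abcdefghijklmnopqrstuvwxyz')
--
-- def is_heterogram(s):
--     seen = set()
--     for c in s.lower():
--         if c in ALPHABET:
--             if c in seen:
--                 return False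
--             seen.add(c)
--     return True
-- ===== Notes on version B (the rewrite author's own statement) =====
-- stated objective: faster
-- what changed: Replaces A's three passes (initialise a 26-key count dict, count every letter of the whole string, then scan the dict for a count > 1) by a single pass that keeps a set of letters already seen and returns False at the first repeated letter.
import Mathlib
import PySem

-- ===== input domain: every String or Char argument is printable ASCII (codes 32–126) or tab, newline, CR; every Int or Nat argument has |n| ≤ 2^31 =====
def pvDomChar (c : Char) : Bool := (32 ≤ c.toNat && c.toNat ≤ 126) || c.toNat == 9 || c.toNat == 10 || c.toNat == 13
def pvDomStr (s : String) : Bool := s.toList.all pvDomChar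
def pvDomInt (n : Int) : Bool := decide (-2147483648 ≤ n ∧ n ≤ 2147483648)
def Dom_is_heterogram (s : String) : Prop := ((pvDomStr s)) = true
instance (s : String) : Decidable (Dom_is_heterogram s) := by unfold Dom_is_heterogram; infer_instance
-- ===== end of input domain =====

-- B replaces A's three passes (init a 26-key count dict, count, scan for a count > 1)
-- by a single early-exit pass over the lowercased string that maintains a set of letters seen.

-- ===== PORT A =====
def is_heterogram (s : String) : Bool :=
  let k := PySem.Str.lower s
  let char : List Char := "abcdefghijklmnopqrstuvwxyz".toList
  let p0 : PySem.Dict Char Int := char.foldl (fun d e => d.insert e 0) PySem.Dict.empty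
  let p : PySem.Dict Char Int :=
    k.toList.foldl (fun d e => if d.contains e then d.modify e 0 (· + 1) else d) p0
  -- 'for e in p: if p[e] > 1: return False' then 'return True'
  if p.keys.any (fun e => decide (1 < p.getD e 0)) then false else true

-- ===== PORT B =====
def pvAlpha : PySem.Set Char := PySem.Set.ofList "abcdefghijklmnopqrstuvwxyz".toList

def pvSeenLoop : List Char → PySem.Set Char → Bool
  | [], _ => true
  | c :: rest, seen =>
    if pvAlpha.contains c then
      if seen.contains c then false
      else pvSeenLoop rest (seen.add c)
    else pvSeenLoop rest seen

def is_heterogram_alt (s : String) : Bool :=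
  pvSeenLoop (PySem.Str.lower s).toList PySem.Set.empty

-- ===== PRECONDITION & SPEC =====
def Spec_is_heterogram (s : String) (out : Bool) : Prop := out = is_heterogram_alt s
instance (s : String) (out : Bool) : Decidable (Spec_is_heterogram s out) := by unfold Spec_is_heterogram; infer_instance

-- ===== CLAIM (what is proved, stated in full; the proofs are below) =====
def Claim_equal_is_heterogram : Prop := ∀ (s : String), Dom_is_heterogram s → Spec_is_heterogram s (is_heterogram s)

-- ===== LEMMAS AND PROOFS =====

def pvLetters : List Char := "abcdefghijklmnopqrstuvwxyz".toList

lemma pvInitGetD (l : List Char) (d : PySem.Dict Char Int) (h : ∀ v, d.getD v 0 = 0) :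
    ∀ v, (l.foldl (fun d e => d.insert e 0) d).getD v 0 = 0 := by
  induction l generalizing d with
  | nil => simpa using h
  | cons e rest ih =>
    intro v
    refine ih _ (fun w => ?_) v
    rw [PySem.Dict.getD_insert]
    split <;> simp [h]

lemma pvCountKeys (l : List Char) (d : PySem.Dict Char Int) :
    (l.foldl (fun d e => if d.contains e then d.modify e 0 (· + 1) else d) d).keys = d.keys := by
  induction l generalizing d with
  | nil => rfl
  | cons e rest ih =>
    simp only [List.foldl_cons]
    split
    · rw [ih]
      rw [PySem.Dict.keys_modify, PySem.Dict.keys_insert_of_contains _ _ (by assumption)]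
    · exact ih d

lemma pvCountGetD (l : List Char) (d : PySem.Dict Char Int) (v : Char) :
    (l.foldl (fun d e => if d.contains e then d.modify e 0 (· + 1) else d) d).getD v 0
      = d.getD v 0 + (if d.contains v then (l.count v : Int) else 0) := by
  induction l generalizing d with
  | nil => simp
  | cons e rest ih =>
    simp only [List.foldl_cons]
    by_cases he : d.contains e = true
    · rw [if_pos he, ih, PySem.Dict.getD_modify, PySem.Dict.contains_modify]
      by_cases hv : v = e
      · subst hv
        simp [he, List.count]
        ring
      · have : ¬ (v = e) := hv
        simp [this, Ne.symm hv]
    · rw [if_neg he, ih]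
      by_cases hv : v = e
      · subst hv; simp [he]
      · simp [Ne.symm hv]

-- characterisation of A: true iff no letter of the alphabet occurs more than once in s.lower()
lemma pvA_char (s : String) :
    is_heterogram s = true ↔ ∀ c ∈ pvLetters, (PySem.Str.lower s).toList.count c ≤ 1 := by
  unfold is_heterogram
  simp only []
  set l := (PySem.Str.lower s).toList with hl
  set p0 : PySem.Dict Char Int :=
    ("abcdefghijklmnopqrstuvwxyz".toList).foldl (fun d e => d.insert e 0) PySem.Dict.empty with hp0
  have hkeys : p0.keys = pvLetters := by rfl
  have hget0 : ∀ v, p0.getD v 0 = 0 := pvInitGetD _ _ (by simp)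
  have hcont : ∀ v, v ∈ pvLetters → p0.contains v = true := by
    intro v hv
    rw [PySem.Dict.contains_eq_decide_mem_keys, hkeys]
    simpa using hv
  rw [pvCountKeys, hkeys]
  constructor
  · intro h c hc
    by_contra hgt
    have h2 : 2 ≤ l.count c := by omega
    have : (List.any pvLetters fun e =>
        decide (1 < (l.foldl (fun d e => if d.contains e then d.modify e 0 (· + 1) else d) p0).getD e 0)) = true := by
      refine List.any_eq_true.mpr ⟨c, hc, ?_⟩
      rw [pvCountGetD, hget0, hcont c hc]
      rw [if_pos rfl]
      rw [decide_eq_true_eq]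
      omega
    rw [this] at h
    simp at h
  · intro h
    have : (List.any pvLetters fun e =>
        decide (1 < (l.foldl (fun d e => if d.contains e then d.modify e 0 (· + 1) else d) p0).getD e 0)) = false := by
      refine List.any_eq_false.mpr ?_
      intro c hc
      rw [pvCountGetD, hget0, hcont c hc]
      rw [if_pos rfl]
      have := h c hc
      simp only [decide_eq_true_eq]
      omega
    rw [this]
    simp

lemma pvAlpha_eq : pvAlpha = pvLetters := by rfl

lemma pvB_loop (l : List Char) :
    ∀ (seen : PySem.Set Char),
      pvSeenLoop l seen = true ↔
        ∀ c ∈ pvLetters, l.count c + (if c ∈ seen then 1 else 0) ≤ 1 := by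
  induction l with
  | nil =>
    intro seen
    simp only [pvSeenLoop, List.count_nil, zero_add, true_iff]
    intro c _; split <;> omega
  | cons e rest ih =>
    intro seen
    by_cases he : e ∈ pvLetters
    · have halpha : pvAlpha.contains e = true := by
        rw [pvAlpha_eq]; exact (PySem.Set.contains_iff _ _).mpr he
      by_cases hseen : e ∈ seen
      · have hs : seen.contains e = true := (PySem.Set.contains_iff _ _).mpr hseen
        simp only [pvSeenLoop, halpha, hs, if_true]
        constructor
        · intro h; exact absurd h (by simp)
        · intro h
          have := h e he
          simp [hseen] at this
      · have hs : seen.contains e = false := by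
          cases h : seen.contains e
          · rfl
          · exact absurd ((PySem.Set.contains_iff _ _).mp h) hseen
        simp only [pvSeenLoop, halpha, hs, if_true, Bool.false_eq_true, if_false]
        rw [ih]
        have key : ∀ c ∈ pvLetters,
            (List.count c (e :: rest) + if c ∈ seen then 1 else 0)
              = (List.count c rest + if c ∈ seen.add e then 1 else 0) := by
          intro c _
          by_cases hce : c = e
          · subst hce
            have : c ∈ seen.add c := (PySem.Set.mem_add _ _ _).mpr (Or.inr rfl)
            simp [hseen]
          · have : (c ∈ seen.add e) ↔ c ∈ seen := by
              rw [PySem.Set.mem_add]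
              exact or_iff_left hce
            simp [Ne.symm hce, this]
        constructor
        · intro h c hc; rw [key c hc]; exact h c hc
        · intro h c hc; rw [← key c hc]; exact h c hc
    · have halpha : pvAlpha.contains e = false := by
        cases h : pvAlpha.contains e
        · rfl
        · rw [pvAlpha_eq] at h
          exact absurd ((PySem.Set.contains_iff _ _).mp h) he
      simp only [pvSeenLoop, halpha, Bool.false_eq_true, if_false]
      rw [ih]
      constructor <;>
      · intro h c hc
        have := h c hc
        have hce : c ≠ e := fun hh => he (hh ▸ hc)
        simpa [List.count_cons, Ne.symm hce] using this

lemma pvB_char (s : String) :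
    is_heterogram_alt s = true ↔ ∀ c ∈ pvLetters, (PySem.Str.lower s).toList.count c ≤ 1 := by
  unfold is_heterogram_alt
  rw [pvB_loop]
  constructor <;> intro h c hc <;> have := h c hc <;>
    simpa [PySem.Set.empty] using this

-- ===== VERDICT (by name: the statement is the Claim_ definition above) =====
theorem is_heterogram_spec : Claim_equal_is_heterogram := by
  intro s _
  unfold Spec_is_heterogram
  have hA := pvA_char s
  have hB := pvB_char s
  cases hb : is_heterogram_alt s <;> cases ha : is_heterogram s
  · rfl
  · exact absurd (hB.mpr (hA.mp ha)) (by simp [hb])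
  · exact absurd (hA.mpr (hB.mp hb)) (by simp [ha])
  · rfl
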